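-- pv_equiv track=rewrite | github.com/JnBrymn/roku | scripts/download_johnson_solids.py | faces_to_edges
-- ===== SOURCE A (Python) =====
-- from typing import List, Tuple, Dict, Set
--
-- def faces_to_edges(faces: List[List[int]]) -> List[Tuple[int, int]]:
--     """
--     Convert faces to edges.
--     Each face contributes edges between consecutive vertices.
--     """
--     edges_set: Set[Tuple[int, int]] = set()
--
--     for face in faces:
--         for i in range(len(face)):
--             v1 = face[i]
--             v2 = face[(i + 1) % len(face)]
--             # Ensure edges are ordered (smaller index first)
--             edge = (min(v1, v2), max(v1, v2))
--             edges_set.add(edge)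
--
--     edges = sorted(list(edges_set))
--     return edges
-- ===== SOURCE B (Python) =====
-- from typing import List, Tuple
--
-- def faces_to_edges(faces: List[List[int]]) -> List[Tuple[int, int]]:
--     """
--     Convert faces to edges.
--     Collect every normalized consecutive-vertex edge (with wraparound) into one
--     flat list, sort it once, then deduplicate with a single adjacent-compare pass.
--     """
--     all_edges: List[Tuple[int, int]] = []
--     for face in faces:
--         rotated = face[1:] + face[:1]
--         for v1, v2 in zip(face, rotated):
--             all_edges.append((v1, v2) if v1 <= v2 else (v2, v1))
--     all_edges.sort()
--     result: List[Tuple[int, int]] = []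
--     for e in all_edges:
--         if not result or result[-1] != e:
--             result.append(e)
--     return result
-- ===== Notes on version B (the rewrite author's own statement) =====
-- stated objective: alternative
-- what changed: Replaces the hash-set deduplication with a flat edge list built by zip-rotation per face, one sort of the full (duplicated) list, and a linear adjacent-compare pass that deduplicates by ordering instead of hashing.
import Mathlib
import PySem

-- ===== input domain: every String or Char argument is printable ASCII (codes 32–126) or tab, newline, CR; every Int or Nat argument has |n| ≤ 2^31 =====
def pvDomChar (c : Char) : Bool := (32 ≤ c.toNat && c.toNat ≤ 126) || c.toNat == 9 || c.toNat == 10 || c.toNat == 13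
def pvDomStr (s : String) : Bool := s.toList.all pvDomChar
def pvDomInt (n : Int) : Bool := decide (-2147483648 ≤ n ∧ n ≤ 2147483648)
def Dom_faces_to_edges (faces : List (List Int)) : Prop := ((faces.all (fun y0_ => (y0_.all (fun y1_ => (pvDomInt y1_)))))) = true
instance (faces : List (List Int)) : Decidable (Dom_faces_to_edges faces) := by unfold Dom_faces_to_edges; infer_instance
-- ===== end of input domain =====

-- B replaces A's hash-set deduplication by one sort of the flat (duplicated) edge list
-- followed by a linear adjacent-compare pass; objective: alternative (same asymptotic cost).

-- ===== PORT A =====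
-- face[i] / face[(i+1) % len(face)]: i comes from range(len(face)), so both indices are in
-- range and pyGetD is exact here (no IndexError is reachable).
def faces_to_edges (faces : List (List Int)) : List (Int × Int) :=
  let edges_set : PySem.Set (Int × Int) :=
    faces.foldl (fun s face =>
      (PySem.List.pyRange 0 (face.length : Int) 1).foldl (fun s i =>
        let v1 := PySem.List.pyGetD face i 0
        let v2 := PySem.List.pyGetD face (PySem.Int.mod (i + 1) (face.length : Int)) 0
        PySem.Set.add s (min v1 v2, max v1 v2)) s) PySem.Set.empty
  PySem.List.sorted2 edges_set Prod.fst Prod.snd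

-- ===== PORT B =====
def faces_to_edges_alt (faces : List (List Int)) : List (Int × Int) :=
  let all_edges : List (Int × Int) :=
    faces.foldl (fun acc face =>
      let rotated := PySem.List.slice face (some 1) none ++ PySem.List.slice face none (some 1)
      (face.zip rotated).foldl (fun acc p =>
        acc ++ [if p.1 ≤ p.2 then (p.1, p.2) else (p.2, p.1)]) acc) []
  let sortedEdges := PySem.List.sorted2 all_edges Prod.fst Prod.snd
  sortedEdges.foldl (fun res e => if res.getLast? = some e then res else res ++ [e]) []

-- ===== PRECONDITION & SPEC =====
def Spec_faces_to_edges (faces : List (List Int)) (out : List (Int × Int)) : Prop := out = faces_to_edges_alt faces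
instance (faces : List (List Int)) (out : List (Int × Int)) : Decidable (Spec_faces_to_edges faces out) := by unfold Spec_faces_to_edges; infer_instance

-- ===== CLAIM (what is proved, stated in full; the proofs are below) =====
def Claim_equal_faces_to_edges : Prop := ∀ (faces : List (List Int)), Dom_faces_to_edges faces → Spec_faces_to_edges faces (faces_to_edges faces)

-- ===== LEMMAS AND PROOFS =====

-- the lexicographic key Python uses to compare (int, int) tuples
def pvLexKey (e : Int × Int) : Lex (Int × Int) := toLex e

lemma pvLexKey_inj : Function.Injective pvLexKey := fun _ _ h => toLex.injective h

-- sorted2 with component keys is sorted with the lexicographic key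
lemma lex_before (a b : Int × Int) :
    (decide (a.1 < b.1) || (!decide (b.1 < a.1) && decide (a.2 < b.2))) = decide (pvLexKey a < pvLexKey b) := by
  have hiff : pvLexKey a < pvLexKey b ↔ a.1 < b.1 ∨ a.1 = b.1 ∧ a.2 < b.2 := Prod.Lex.lt_iff
  rcases lt_trichotomy a.1 b.1 with h | h | h
  · simp [hiff, h]
  · simp [hiff, h]
  · simp [hiff, not_lt.mpr (le_of_lt h), h, h.ne']

lemma sorted2_eq_sorted_lex (xs : List (Int × Int)) :
    PySem.List.sorted2 xs Prod.fst Prod.snd false = PySem.List.sorted xs pvLexKey false := by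
  have hb : (fun (a b : Int × Int) => decide (a.1 < b.1) || (!decide (b.1 < a.1) && decide (a.2 < b.2)))
      = (fun a b => decide (pvLexKey a < pvLexKey b)) :=
    funext fun a => funext fun b => lex_before a b
  rw [PySem.List.sorted_eq_foldl_insertBy]
  show List.foldl (fun acc x => PySem.List.insertBy
      (fun a b => decide (a.1 < b.1) || (!decide (b.1 < a.1) && decide (a.2 < b.2))) x acc) [] xs = _
  rw [hb]

-- per-face vertex-pair lists: index/mod loop = zip with the rotated face
lemma pairs_face_eq (face : List Int) :
    (PySem.List.pyRange 0 (face.length : Int) 1).map (fun i =>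
        (PySem.List.pyGetD face i 0,
         PySem.List.pyGetD face (PySem.Int.mod (i + 1) (face.length : Int)) 0))
    = face.zip (face.drop 1 ++ face.take 1) := by
  apply List.ext_getElem
  · simp; omega
  · intro k h1 h2
    have hk : k < face.length := by
      by_contra hc
      simp at h1
      omega
    have h0 : (0:Int) < (face.length : Int) := by exact_mod_cast Nat.pos_of_ne_zero (by omega)
    simp only [List.getElem_map, PySem.List.getElem_pyRange_one, List.getElem_zip]
    rw [zero_add, PySem.Int.mod_eq_emod_of_pos h0, PySem.List.pyGetD_natCast,
      List.getD_eq_getElem _ _ hk]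
    have hd1 : (face.drop 1).length = face.length - 1 := by simp
    rcases Nat.lt_or_ge k (face.length - 1) with hlt | hge
    · have hm : ((k:Int) + 1) % (face.length:Int) = ((k+1 : Nat) : Int) := by
        rw [Int.emod_eq_of_lt (by omega) (by exact_mod_cast (by omega : k + 1 < face.length))]
        push_cast; ring
      rw [hm, PySem.List.pyGetD_natCast, List.getD_eq_getElem _ _ (by omega)]
      rw [List.getElem_append_left (by omega : k < (face.drop 1).length)]
      rw [List.getElem_drop]
      simp [Nat.add_comm]
    · have hke : k = face.length - 1 := by omega
      have hm : ((k:Int) + 1) % (face.length:Int) = 0 := by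
        have : (k:Int) + 1 = (face.length:Int) := by omega
        rw [this, Int.emod_self]
      rw [hm]
      rw [PySem.List.pyGetD_zero, List.getD_eq_getElem _ _ (by omega)]
      rw [List.getElem_append_right (by omega : (face.drop 1).length ≤ k)]
      simp [List.getElem_take, hke]

-- B's normalized edge list for one face
def pvEdges (face : List Int) : List (Int × Int) :=
  (face.zip (face.drop 1 ++ face.take 1)).map
    (fun p => if p.1 ≤ p.2 then (p.1, p.2) else (p.2, p.1))

-- A's edge list for one face equals B's
lemma edges_face_eq (face : List Int) :
    (PySem.List.pyRange 0 (face.length : Int) 1).map (fun i =>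
        (min (PySem.List.pyGetD face i 0)
             (PySem.List.pyGetD face (PySem.Int.mod (i + 1) (face.length : Int)) 0),
         max (PySem.List.pyGetD face i 0)
             (PySem.List.pyGetD face (PySem.Int.mod (i + 1) (face.length : Int)) 0)))
    = pvEdges face := by
  rw [pvEdges, ← pairs_face_eq, List.map_map]
  apply List.map_congr_left
  intro i _
  simp only [Function.comp]
  by_cases hp : PySem.List.pyGetD face i 0 ≤
      PySem.List.pyGetD face (PySem.Int.mod (i + 1) (face.length : Int)) 0
  · simp [hp]
  · simp [hp, le_of_lt (lt_of_not_ge hp)]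

-- the flat edge list built by B
def pvAllEdges (faces : List (List Int)) : List (Int × Int) :=
  faces.foldl (fun acc face => acc ++ pvEdges face) []

-- A's set fold is set(pvAllEdges)
lemma setA_gen (faces : List (List Int)) :
    ∀ acc : List (Int × Int),
      faces.foldl (fun s face =>
        (PySem.List.pyRange 0 (face.length : Int) 1).foldl (fun s i =>
          let v1 := PySem.List.pyGetD face i 0
          let v2 := PySem.List.pyGetD face (PySem.Int.mod (i + 1) (face.length : Int)) 0
          PySem.Set.add s (min v1 v2, max v1 v2)) s) (PySem.Set.ofList acc)
      = PySem.Set.ofList (faces.foldl (fun l face => l ++ pvEdges face) acc) := by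
  induction faces with
  | nil => intro acc; rfl
  | cons f fs ih =>
    intro acc
    have hinner : (PySem.List.pyRange 0 (f.length : Int) 1).foldl (fun s i =>
          let v1 := PySem.List.pyGetD f i 0
          let v2 := PySem.List.pyGetD f (PySem.Int.mod (i + 1) (f.length : Int)) 0
          PySem.Set.add s (min v1 v2, max v1 v2)) (PySem.Set.ofList acc)
        = PySem.Set.ofList (acc ++ pvEdges f) := by
      have hmap : PySem.Set.ofList (acc ++ pvEdges f)
          = (pvEdges f).foldl PySem.Set.add (PySem.Set.ofList acc) := by
        rw [PySem.Set.ofList_eq_foldl, PySem.Set.ofList_eq_foldl, List.foldl_append]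
      rw [hmap, ← edges_face_eq, List.foldl_map]
    simp only [List.foldl_cons, hinner, ih]

-- the adjacent-dedup recursion underlying B's final loop
def pvGo (prev : Int × Int) : List (Int × Int) → List (Int × Int)
  | [] => []
  | e :: t => if e = prev then pvGo prev t else e :: pvGo e t

lemma foldl_dedup_go (t : List (Int × Int)) :
    ∀ (acc : List (Int × Int)) (prev : Int × Int),
      t.foldl (fun res e => if res.getLast? = some e then res else res ++ [e]) (acc ++ [prev])
        = acc ++ prev :: pvGo prev t := by
  induction t with
  | nil => intro acc prev; simp [pvGo]
  | cons e t ih =>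
    intro acc prev
    simp only [List.foldl_cons, List.getLast?_concat]
    by_cases he : e = prev
    · rw [if_pos (by rw [he]), ih acc prev, pvGo, if_pos he]
    · rw [if_neg (by simpa using fun h => he h.symm)]
      rw [ih (acc ++ [prev]) e, pvGo, if_neg he]
      simp

-- dedup of a ≤-sorted run-list: strictly increasing, same members
lemma pvGo_spec (es : List (Int × Int)) :
    ∀ prev, (prev :: es).Pairwise (fun a b => pvLexKey a ≤ pvLexKey b) →
      (prev :: pvGo prev es).Pairwise (fun a b => pvLexKey a < pvLexKey b) ∧
      ∀ x, (x ∈ prev :: pvGo prev es ↔ x ∈ prev :: es) := by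
  induction es with
  | nil => intro prev _; simp [pvGo]
  | cons e t ih =>
    intro prev hp
    rw [List.pairwise_cons] at hp
    obtain ⟨hprev, ht⟩ := hp
    by_cases he : e = prev
    · have hpt : (prev :: t).Pairwise (fun a b => pvLexKey a ≤ pvLexKey b) := by
        rw [List.pairwise_cons]
        exact ⟨fun b hb => hprev b (List.mem_cons_of_mem _ hb), (List.pairwise_cons.mp ht).2⟩
      obtain ⟨hpw, hmem⟩ := ih prev hpt
      refine ⟨by simpa [pvGo, he] using hpw, ?_⟩
      intro x
      rw [pvGo, if_pos he]
      have hx := hmem x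
      simp only [List.mem_cons] at hx ⊢
      subst he
      tauto
    · obtain ⟨hpw, hmem⟩ := ih e ht
      have hlt : pvLexKey prev < pvLexKey e :=
        lt_of_le_of_ne (hprev e List.mem_cons_self) (fun hk => he (pvLexKey_inj hk).symm)
      refine ⟨?_, ?_⟩
      · rw [pvGo, if_neg he, List.pairwise_cons]
        refine ⟨?_, hpw⟩
        intro b hb
        rcases List.mem_cons.mp hb with h | h
        · exact h ▸ hlt
        · have hbm : b ∈ e :: t := (hmem b).mp (List.mem_cons_of_mem _ h)
          rcases List.mem_cons.mp hbm with h' | h'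
          · exact h' ▸ hlt
          · exact hlt.trans_le ((List.pairwise_cons.mp ht).1 b h')
      · intro x
        rw [pvGo, if_neg he]
        have hx := hmem x
        simp only [List.mem_cons] at hx ⊢
        tauto

-- B's flat list as it appears syntactically in the port equals pvAllEdges
lemma allEdges_eq (faces : List (List Int)) :
    faces.foldl (fun acc face =>
      let rotated := PySem.List.slice face (some 1) none ++ PySem.List.slice face none (some 1)
      (face.zip rotated).foldl (fun acc p =>
        acc ++ [if p.1 ≤ p.2 then (p.1, p.2) else (p.2, p.1)]) acc) []
    = pvAllEdges faces := by
  unfold pvAllEdges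
  apply PySem.List.foldl_congr_mem
  intro acc face _
  show (face.zip (PySem.List.slice face (some 1) none ++ PySem.List.slice face none (some 1))).foldl
      (fun acc p => acc ++ [if p.1 ≤ p.2 then (p.1, p.2) else (p.2, p.1)]) acc = acc ++ pvEdges face
  rw [PySem.List.slice_from_one, PySem.List.slice_to face (b := 1) (by omega), ← List.drop_one]
  rw [PySem.List.foldl_append_singleton_eq_map]
  rfl

-- the main equation: sorted set = sorted-then-adjacent-dedup of the flat list
lemma sorted_set_eq_dedup (E : List (Int × Int)) :
    PySem.List.sorted (PySem.Set.ofList E) pvLexKey false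
      = (PySem.List.sorted E pvLexKey false).foldl
          (fun res e => if res.getLast? = some e then res else res ++ [e]) [] := by
  rcases hE : PySem.List.sorted E pvLexKey false with _ | ⟨d, t⟩
  · rw [PySem.List.sorted_eq_nil_iff] at hE
    subst hE
    rfl
  · have hfold : (d :: t).foldl (fun res e => if res.getLast? = some e then res else res ++ [e]) []
        = d :: pvGo d t := by
      have h1 : (if ([] : List (Int × Int)).getLast? = some d then ([] : List (Int × Int)) else [] ++ [d]) = [] ++ [d] := by
        simp
      rw [List.foldl_cons, h1, foldl_dedup_go t [] d]
      simp
    rw [hfold]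
    have hsorted : (d :: t).Pairwise (fun a b => pvLexKey a ≤ pvLexKey b) := by
      rw [← hE]; exact PySem.List.sorted_pairwise E pvLexKey
    obtain ⟨hpw, hmem⟩ := pvGo_spec t d hsorted
    have hnd : (d :: pvGo d t).Nodup :=
      hpw.imp (fun h => fun heq => absurd (heq ▸ rfl) h.ne')
    have hperm : (d :: pvGo d t).Perm (PySem.Set.ofList E) := by
      rw [List.perm_ext_iff_of_nodup hnd (PySem.Set.nodup_ofList E)]
      intro x
      rw [hmem x, ← hE, PySem.List.mem_sorted, PySem.Set.mem_ofList]
    exact PySem.List.sorted_eq_of_perm_of_pairwise_lt _ _ _ hperm hpw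

-- ===== VERDICT (by name: the statement is the Claim_ definition above) =====
theorem faces_to_edges_spec : Claim_equal_faces_to_edges := by
  intro faces _
  show faces_to_edges faces = faces_to_edges_alt faces
  have hset : faces.foldl (fun s face =>
      (PySem.List.pyRange 0 (face.length : Int) 1).foldl (fun s i =>
        let v1 := PySem.List.pyGetD face i 0
        let v2 := PySem.List.pyGetD face (PySem.Int.mod (i + 1) (face.length : Int)) 0
        PySem.Set.add s (min v1 v2, max v1 v2)) s) PySem.Set.empty
      = PySem.Set.ofList (pvAllEdges faces) := by
    have := setA_gen faces []
    simpa [pvAllEdges] using this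
  have hA : faces_to_edges faces
      = PySem.List.sorted (PySem.Set.ofList (pvAllEdges faces)) pvLexKey false := by
    show PySem.List.sorted2 (faces.foldl (fun s face =>
        (PySem.List.pyRange 0 (face.length : Int) 1).foldl (fun s i =>
          let v1 := PySem.List.pyGetD face i 0
          let v2 := PySem.List.pyGetD face (PySem.Int.mod (i + 1) (face.length : Int)) 0
          PySem.Set.add s (min v1 v2, max v1 v2)) s) PySem.Set.empty) Prod.fst Prod.snd = _
    rw [hset, sorted2_eq_sorted_lex]
  have hB : faces_to_edges_alt faces
      = (PySem.List.sorted (pvAllEdges faces) pvLexKey false).foldl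
          (fun res e => if res.getLast? = some e then res else res ++ [e]) [] := by
    show (PySem.List.sorted2 (faces.foldl (fun acc face =>
        let rotated := PySem.List.slice face (some 1) none ++ PySem.List.slice face none (some 1)
        (face.zip rotated).foldl (fun acc p =>
          acc ++ [if p.1 ≤ p.2 then (p.1, p.2) else (p.2, p.1)]) acc) []) Prod.fst Prod.snd).foldl
        (fun res e => if res.getLast? = some e then res else res ++ [e]) [] = _
    rw [allEdges_eq, sorted2_eq_sorted_lex]
  rw [hA, hB]
  exact sorted_set_eq_dedup (pvAllEdges faces)
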